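-- pv_equiv track=rewrite | github.com/rodrigosantiag/python-exercises | crypto-square/crypto_square.py | build_square
-- ===== SOURCE A (Python) =====
-- def build_square(text: str) -> list[str]:
--     text_length = len(text)
--     row = column = 0
--
--     while True:
--         condition = row * column >= text_length and column >= row and column - row <= 1
--
--         if condition:
--             break
--
--         if column == row:
--             column += 1
--
--         if column - row >= 1:
--             row += 1
--
--     result = [text[col:col + column].ljust(column, " ") for col in range(0, text_length, column)]
--
--     return result
-- ===== SOURCE B (Python) =====
-- def build_square(text: str) -> list[str]:
--     n = len(text)
--     c = 1
--     while c * c < n: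
--         c += 1
--     rows = []
--     rest = text
--     while rest:
--         rows.append(rest[:c].ljust(c, " "))
--         rest = rest[c:]
--     return rows
-- ===== Notes on version B (the rewrite author's own statement) =====
-- stated objective: simpler
-- what changed: A's two-variable while-True search over (row, column) with a three-part break condition becomes a one-variable `while c*c < n` search, and the index/slice/ljust comprehension over range(0, n, c) becomes a loop that repeatedly splits off the first c characters of the remaining text.
import Mathlib
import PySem

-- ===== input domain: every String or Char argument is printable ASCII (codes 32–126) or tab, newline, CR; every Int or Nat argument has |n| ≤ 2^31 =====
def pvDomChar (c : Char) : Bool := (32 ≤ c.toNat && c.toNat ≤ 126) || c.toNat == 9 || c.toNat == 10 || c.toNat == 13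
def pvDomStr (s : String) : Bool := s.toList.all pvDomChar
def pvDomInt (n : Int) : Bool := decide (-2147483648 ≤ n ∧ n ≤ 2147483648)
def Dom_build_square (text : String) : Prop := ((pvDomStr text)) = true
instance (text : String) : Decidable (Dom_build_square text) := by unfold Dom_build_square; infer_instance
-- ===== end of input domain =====

-- B replaces A's two-variable while-True dimension search and the range/slice comprehension
-- by a single-variable square search and a take/drop chunking loop: simpler, same cost.


-- s.ljust(w, " "): exact port of Python's str.ljust with a space fill (pads on the right up to width w)
def pyLjust (cs : List Char) (w : Int) : List Char :=
  cs ++ List.replicate (w.toNat - cs.length) ' '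

-- ===== PORT A =====
-- A's `while True` search over (row, column); fuel only makes it total (the loop breaks
-- after at most text_length+1 condition checks, so the fuel below is never exhausted on Pre_).
def buildLoopA (n : Int) (row column : Int) : Nat → Int
  | 0 => column
  | fuel+1 =>
    if row * column ≥ n ∧ column ≥ row ∧ column - row ≤ 1 then column
    else
      let column' := if column == row then column + 1 else column
      let row' := if column' - row ≥ 1 then row + 1 else row
      buildLoopA n row' column' fuel

def build_square (text : String) : List String :=
  let text_length : Int := PySem.Str.len text
  let column := buildLoopA text_length 0 0 (text_length.toNat + 2)
  (PySem.List.pyRange 0 text_length column).map (fun col =>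
    String.ofList (pyLjust (PySem.List.slice text.toList (some col) (some (col + column))) column))

-- ===== PORT B =====
-- B's `while c * c < n` search; fuel only makes it total (never exhausted: c reaches ceil(sqrt n) ≤ n).
def buildLoopB (n : Int) (c : Int) : Nat → Int
  | 0 => c
  | fuel+1 => if c * c < n then buildLoopB n (c + 1) fuel else c

-- B's `while rest` chunking loop; fuel only makes it total (each step drops c ≥ 1 characters).
def chunkLoopB (c : Int) : Nat → List String → List Char → List String
  | 0, rows, _ => rows
  | fuel+1, rows, rest =>
    if rest.isEmpty then rows
    else chunkLoopB c fuel
      (rows ++ [String.ofList (pyLjust (PySem.List.slice rest none (some c)) c)])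
      (PySem.List.slice rest (some c) none)

def build_square_alt (text : String) : List String :=
  let n : Int := PySem.Str.len text
  let c := buildLoopB n 1 (n.toNat + 1)
  chunkLoopB c (n.toNat + 1) [] text.toList

-- ===== PRECONDITION & SPEC =====
-- Pre_ excludes only the empty string, on which A raises ValueError (the dimension search
-- breaks at column == 0 and range() gets step 0); B returns [] there.
def Pre_build_square (text : String) : Prop := text.toList ≠ []
instance (text : String) : Decidable (Pre_build_square text) := by unfold Pre_build_square; infer_instance
def pvWitness_build_square : String := "ab"

def Spec_build_square (text : String) (out : List String) : Prop := out = build_square_alt text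
instance (text : String) (out : List String) : Decidable (Spec_build_square text out) := by unfold Spec_build_square; infer_instance

-- ===== CLAIM (what is proved, stated in full; the proofs are below) =====
def Claim_equal_build_square : Prop := ∀ (text : String), Dom_build_square text → Pre_build_square text → Spec_build_square text (build_square text)

-- ===== LEMMAS AND PROOFS =====

-- A's loop, started on the diagonal, is B's loop: at state (k,k) the break condition is k*k ≥ n
-- and a non-breaking step moves to (k+1, k+1).
theorem loopA_eq_loopB (n : Int) : ∀ (fuel : Nat) (k : Int),
    buildLoopA n k k fuel = buildLoopB n k fuel := by
  intro fuel
  induction fuel with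
  | zero => intro k; rfl
  | succ m ih =>
    intro k
    simp only [buildLoopA, buildLoopB]
    by_cases h : k * k < n
    · have hc : ¬ (k * k ≥ n ∧ k ≥ k ∧ k - k ≤ 1) := by omega
      simp [h, ih]
    · have hc : (k * k ≥ n ∧ k ≥ k ∧ k - k ≤ 1) := by omega
      simp [hc, h]

theorem loopB_ge (n : Int) : ∀ (fuel : Nat) (k : Int), k ≤ buildLoopB n k fuel := by
  intro fuel
  induction fuel with
  | zero => intro k; simp [buildLoopB]
  | succ m ih =>
    intro k
    simp only [buildLoopB]
    split
    · exact le_trans (by omega) (ih (k + 1))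
    · exact le_refl k

theorem range_count_succ (n c : Nat) (hn : 1 ≤ n) (hc : 1 ≤ c) :
    ((n : Int) + c - 1) / c = ((if (0:Int) < ((n - c : Nat) : Int) then (((n - c : Nat) : Int) + c - 1) / c else 0)) + 1 := by
  by_cases h : n ≤ c
  · have h0 : (n - c : Nat) = 0 := by omega
    rw [h0]
    have h1 : ((n : Int) + c - 1) = ((n : Int) - 1) + 1 * c := by ring
    rw [h1, Int.add_mul_ediv_right _ _ (by omega : (c:Int) ≠ 0),
        Int.ediv_eq_zero_of_lt (by omega) (by omega)]
    simp
  · have hm : (0:Int) < ((n - c : Nat) : Int) := by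
      have h2 : 1 ≤ n - c := by omega
      exact_mod_cast h2
    rw [if_pos hm]
    have h1 : ((n : Int) + c - 1) = (((n - c : Nat) : Int) + c - 1) + 1 * c := by omega
    rw [h1, Int.add_mul_ediv_right _ _ (by omega : (c:Int) ≠ 0)]

-- Splitting the step-c range of A's comprehension: first chunk plus the shifted tail.
theorem map_pyRange_chunk (c : Nat) (hc : 1 ≤ c) (f : Int → String) (n : Nat) (hn : 1 ≤ n) :
    (PySem.List.pyRange 0 (n : Int) (c : Int)).map f
      = f 0 :: (PySem.List.pyRange 0 ((n - c : Nat) : Int) (c : Int)).map (fun col => f (col + c)) := by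
  have hcpos : (0:Int) < (c : Int) := by exact_mod_cast hc
  rw [PySem.List.pyRange_of_pos 0 _ hcpos, PySem.List.pyRange_of_pos 0 _ hcpos]
  have hn0 : (0:Int) < (n : Int) := by exact_mod_cast hn
  rw [if_pos hn0]
  have hq := range_count_succ n c hn hc
  simp only [sub_zero, zero_add] at *
  rw [hq]
  have hqnn : (0:Int) ≤ (if (0:Int) < ((n - c : Nat) : Int) then (((n - c : Nat) : Int) + c - 1) / c else 0) := by
    split
    · apply Int.ediv_nonneg (by omega) (by omega)
    · exact le_refl 0
  rw [show ((if (0:Int) < ((n - c : Nat) : Int) then (((n - c : Nat) : Int) + c - 1) / c else 0) + 1).toNat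
        = (if (0:Int) < ((n - c : Nat) : Int) then (((n - c : Nat) : Int) + c - 1) / c else 0).toNat + 1 by omega]
  rw [List.range_succ_eq_map]
  simp only [List.map_cons, List.map_map, Nat.cast_zero, mul_zero]
  by_cases hm : (0:Int) < ((n - c : Nat) : Int)
  · rw [if_pos hm, if_pos hm]
    refine congrArg (List.cons (f 0)) ?_
    apply List.map_congr_left
    intro k _
    simp only [Function.comp_apply, Nat.succ_eq_add_one]
    refine congrArg f ?_
    push_cast
    ring
  · rw [if_neg hm, if_neg hm]
    simp

-- The chunk of L at offset j+c is the chunk of L.drop c at offset j (j nonnegative).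
theorem slice_drop_shift (L : List Char) (c : Nat) (j : Int) (hj : 0 ≤ j) :
    PySem.List.slice L (some (j + (c : Int))) (some (j + (c : Int) + (c : Int)))
      = PySem.List.slice (L.drop c) (some j) (some (j + (c : Int))) := by
  rw [PySem.List.slice_toNat L (by omega : (0:Int) ≤ j + (c:Int)) (by omega),
      PySem.List.slice_toNat (L.drop c) hj (by omega), List.drop_drop]
  have h1 : (j + (c:Int) + c).toNat - (j + (c:Int)).toNat = (j + (c:Int)).toNat - j.toNat := by omega
  have h2 : (j + (c:Int)).toNat = c + j.toNat := by omega
  rw [h1, h2]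

-- B's chunk loop computes A's comprehension, for any string and enough fuel.
theorem chunkLoop_eq (c : Nat) (hc : 1 ≤ c) : ∀ (fuel : Nat) (L : List Char) (rows : List String),
    L.length ≤ fuel →
    chunkLoopB (c : Int) fuel rows L
      = rows ++ (PySem.List.pyRange 0 (L.length : Int) (c : Int)).map (fun col =>
          String.ofList (pyLjust (PySem.List.slice L (some col) (some (col + (c : Int)))) (c : Int))) := by
  have hcpos : (0:Int) < (c : Int) := by exact_mod_cast hc
  intro fuel
  induction fuel with
  | zero =>
    intro L rows hL
    have : L = [] := by
      cases L with
      | nil => rfl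
      | cons a t => simp at hL
    subst this
    simp [chunkLoopB, PySem.List.pyRange_of_pos 0 0 hcpos]
  | succ m ih =>
    intro L rows hL
    cases hE : L.isEmpty with
    | true =>
      have : L = [] := by simpa [List.isEmpty_iff] using hE
      subst this
      simp [chunkLoopB, PySem.List.pyRange_of_pos 0 0 hcpos]
    | false =>
      have hne : L ≠ [] := by simpa [List.isEmpty_iff] using hE
      have hn1 : 1 ≤ L.length := by
        cases L with
        | nil => exact absurd rfl hne
        | cons a t => simp
      simp only [chunkLoopB, hE, Bool.false_eq_true, ite_false]
      rw [ih (PySem.List.slice L (some (c : Int)) none)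
            (rows ++ [String.ofList (pyLjust (PySem.List.slice L none (some (c : Int))) (c : Int))])
            (by rw [PySem.List.slice_from_natCast]; simp; omega)]
      rw [PySem.List.slice_from_natCast]
      rw [map_pyRange_chunk c hc _ L.length hn1]
      have hlen : ((L.drop c).length : Int) = (((L.length - c : Nat) : Nat) : Int) := by
        simp
      rw [hlen]
      simp only [List.append_assoc, List.singleton_append]
      refine congrArg _ ?_
      refine congrArg₂ _ ?_ ?_
      · -- head chunk: slice L none c  vs  slice L 0 (0+c)
        rw [PySem.List.slice_to_natCast]
        have : (0:Int) + (c : Int) = ((c : Nat) : Int) := by omega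
        rw [this, PySem.List.slice_zero_start, PySem.List.slice_to_natCast]
      · apply List.map_congr_left
        intro col hcol
        have hmem := (PySem.List.mem_pyRange_iff_of_pos hcpos col).mp hcol
        have hcol0 : 0 ≤ col := by omega
        rw [slice_drop_shift L c col hcol0]

-- ===== VERDICT (by name: the statement is the Claim_ definition above) =====
theorem build_square_spec : Claim_equal_build_square := by
  intro text _ hpre
  unfold Spec_build_square build_square build_square_alt
  simp only [PySem.Str.len_eq]
  set L := text.toList with hLdef
  have hn1 : 1 ≤ L.length := by
    cases hL : L with
    | nil => exact absurd hL hpre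
    | cons a t => simp
  have htn : ((L.length : Int)).toNat = L.length := by omega
  rw [htn]
  -- A's first loop iteration moves (0,0) to (1,1)
  have hstep0 : ∀ (m : Nat), buildLoopA (L.length : Int) 0 0 (m + 1)
      = buildLoopA (L.length : Int) 1 1 m := by
    intro m
    simp only [buildLoopA]
    rw [if_neg (by push_cast; omega)]
    norm_num
  have hstep : buildLoopA (L.length : Int) 0 0 (L.length + 2)
      = buildLoopB (L.length : Int) 1 (L.length + 1) := by
    rw [show L.length + 2 = (L.length + 1) + 1 by rfl, hstep0 (L.length + 1)]
    exact loopA_eq_loopB _ _ _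
  rw [hstep]
  set c := buildLoopB (L.length : Int) 1 (L.length + 1) with hcdef
  have hc1 : 1 ≤ c := loopB_ge _ _ _
  have hcc : c = ((c.toNat : Nat) : Int) := by omega
  rw [hcc]
  rw [chunkLoop_eq c.toNat (by omega) (L.length + 1) L [] (by omega)]
  simp
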